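-- pv_equiv track=rewrite | github.com/ver1-1a/habbo-vl64 | main.py | vl64_decode_verbose
-- ===== SOURCE A (Python) =====
-- def vl64_decode_verbose(s):
--     """Decodes a variable-length base64-encoded string from the given input, outputting detailed results."""
--     base_offset = 64
--     decoded_values = []
--
--     i = 0
--     while i < len(s):
--         startCode = ord(s[i])
--         finish = (startCode - 72 + 8) // 8
--         code1 = startCode - 64 - 8 * finish
--         otherCodes = 0
--         multiplier = 4
--
--         for count in range(finish - 1):
--             i += 1
--             otherCodes += multiplier * (ord(s[i]) - base_offset)
--             multiplier *= 64
--
--         decodedValue = code1 + otherCodes if code1 < 4 else 4 - code1 + otherCodes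
--         processedString = s[i-finish+1:i+1]
--         decoded_values.append(f"{processedString} = {decodedValue}")
--         i += 1
--
--     return decoded_values
-- ===== SOURCE B (Python) =====
-- def vl64_decode_verbose(s):
--     """Decodes a variable-length base64-encoded string, outputting detailed results.
--
--     Two staged passes: pass 1 cuts the stream into value spans [start, stop)
--     (a byte whose width comes out below 1 is consumed alone and owns an empty
--     span); pass 2 decodes each span on its own, reading the payload as a
--     base-64 numeral by Horner's rule and applying the sign branch-free."""
--     spans = []
--     i = 0
--     while i < len(s):
--         width = (ord(s[i]) - 64) // 8
--         spans.append((i, i + max(width, 0)))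
--         i += max(width, 1)
--
--     out = []
--     for start, stop in spans:
--         mag = 0
--         for ch in reversed(s[start + 1:stop]):
--             mag = 64 * mag + ord(ch) - 64
--         low3 = (ord(s[start]) - 64) % 8
--         value = 4 * mag + low3 % 4 * (1 - low3 // 4 * 2)
--         out.append(f"{s[start:stop]} = {value}")
--     return out
-- ===== Notes on version B (the rewrite author's own statement) =====
-- stated objective: alternative
-- what changed: A decodes in one index-mutating while-loop whose inner for-loop threads a running multiplier and a branch picks the sign; B first cuts the stream into [start,stop) spans, then decodes each span independently, reading the payload right-to-left as a base-64 numeral by Horner's rule and applying the sign with a branch-free mod/floordiv formula.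
import Mathlib
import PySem

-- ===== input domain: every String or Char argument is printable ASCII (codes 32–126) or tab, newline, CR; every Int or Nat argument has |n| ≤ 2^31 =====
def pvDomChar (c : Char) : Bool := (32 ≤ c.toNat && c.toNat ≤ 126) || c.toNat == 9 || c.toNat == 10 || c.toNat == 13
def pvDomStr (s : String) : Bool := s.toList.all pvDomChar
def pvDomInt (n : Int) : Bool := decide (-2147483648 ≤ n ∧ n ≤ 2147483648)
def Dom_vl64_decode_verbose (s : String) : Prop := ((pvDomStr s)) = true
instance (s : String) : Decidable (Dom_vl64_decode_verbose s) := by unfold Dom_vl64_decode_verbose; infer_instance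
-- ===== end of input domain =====

-- B replaces A's single index-mutating loop by two staged passes (cut the stream into spans, then
-- decode each span via right-to-left Horner evaluation and a branch-free sign formula);
-- same return value on every input where A returns (objective: alternative).

-- ===== PORT A =====
-- A's while-loop: state is the index i and the accumulator; the inner `for count in range(finish-1)`
-- is a foldl threading (i, otherCodes, multiplier).  fuel = len(s) bounds the iterations (i grows
-- by at least 1 per round), so the port returns exactly what A's loop returns wherever A returns.
def vl64A_loop (cs : List Char) (fuel : Nat) (i : Int) (acc : List String) : List String :=
  match fuel with
  | 0 => acc
  | fuel + 1 =>
    if i < (cs.length : Int) then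
      let startCode : Int := ((PySem.List.pyGetD cs i ' ').toNat : Int)
      let finish := PySem.Int.floordiv (startCode - 72 + 8) 8
      let code1 := startCode - 64 - 8 * finish
      -- for count in range(finish - 1): i += 1; otherCodes += multiplier*(ord(s[i])-64); multiplier *= 64
      let st := (PySem.List.pyRange 0 (finish - 1) 1).foldl
        (fun (st : Int × Int × Int) _ =>
          let i := st.1 + 1
          let otherCodes := st.2.1 + st.2.2 * (((PySem.List.pyGetD cs i ' ').toNat : Int) - 64)
          let multiplier := st.2.2 * 64
          (i, otherCodes, multiplier))
        (i, 0, 4)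
      let i' := st.1
      let otherCodes := st.2.1
      let decodedValue := if code1 < 4 then code1 + otherCodes else 4 - code1 + otherCodes
      let processedString := PySem.List.slice cs (some (i' - finish + 1)) (some (i' + 1))
      vl64A_loop cs fuel (i' + 1)
        (acc ++ [String.ofList (processedString ++ (' ' :: '=' :: ' ' :: []) ++ PySem.Int.toChars decodedValue)])
    else acc

def vl64_decode_verbose (s : String) : List String :=
  vl64A_loop s.toList s.toList.length 0 []

-- ===== PORT B =====
-- pass 1: cut the stream into value spans [start, stop); fuel = len(s) bounds the while-loop
-- iterations (the index grows by at least 1 each round).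
def pvBSpans (cs : List Char) (fuel : Nat) (i : Int) : List (Int × Int) :=
  match fuel with
  | 0 => []
  | fuel + 1 =>
    if i < (cs.length : Int) then
      let width := PySem.Int.floordiv (((PySem.List.pyGetD cs i ' ').toNat : Int) - 64) 8
      (i, i + max width 0) :: pvBSpans cs fuel (i + max width 1)
    else []

-- pass 2: decode one span — payload read right-to-left by Horner's rule, branch-free sign
def pvBDecode (cs : List Char) (p : Int × Int) : String :=
  let mag := (PySem.List.slice cs (some (p.1 + 1)) (some p.2)).reverse.foldl
    (fun m ch => 64 * m + ((ch.toNat : Int) - 64)) 0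
  let low3 := PySem.Int.mod (((PySem.List.pyGetD cs p.1 ' ').toNat : Int) - 64) 8
  let value := 4 * mag + PySem.Int.mod low3 4 * (1 - PySem.Int.floordiv low3 4 * 2)
  String.ofList (PySem.List.slice cs (some p.1) (some p.2) ++ (' ' :: '=' :: ' ' :: []) ++ PySem.Int.toChars value)

def vl64_decode_verbose_alt (s : String) : List String :=
  (pvBSpans s.toList s.toList.length 0).map (pvBDecode s.toList)

-- ===== PRECONDITION & SPEC =====
-- Shape predicate (computes no output): scanning left to right, `need` counts the continuation
-- bytes still owed to the current value; each lead byte read at need = 0 owes finish-1 bytes, and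
-- the string must not end while bytes are owed.  A raises IndexError exactly where pvWF is false.
def pvWF : List Char → Nat → Bool
  | [], need => need == 0
  | c :: rest, 0 =>
    let finish := PySem.Int.floordiv ((c.toNat : Int) - 64) 8
    pvWF rest (if 1 ≤ finish then (finish - 1).toNat else 0)
  | _ :: rest, need + 1 => pvWF rest need

def Pre_vl64_decode_verbose (s : String) : Prop := pvWF s.toList 0 = true
instance (s : String) : Decidable (Pre_vl64_decode_verbose s) := by
  unfold Pre_vl64_decode_verbose; infer_instance

def pvWitness_vl64_decode_verbose : String := "RAH"

def Spec_vl64_decode_verbose (s : String) (out : List String) : Prop := out = vl64_decode_verbose_alt s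
instance (s : String) (out : List String) : Decidable (Spec_vl64_decode_verbose s out) := by unfold Spec_vl64_decode_verbose; infer_instance

-- ===== CLAIM (what is proved, stated in full; the proofs are below) =====
def Claim_equal_vl64_decode_verbose : Prop := ∀ (s : String), Dom_vl64_decode_verbose s → Pre_vl64_decode_verbose s → Spec_vl64_decode_verbose s (vl64_decode_verbose s)

-- ===== LEMMAS AND PROOFS =====

theorem pvWF_drop (n : Nat) : ∀ (xs : List Char),
    pvWF xs n = true ↔ n ≤ xs.length ∧ pvWF (xs.drop n) 0 = true := by
  induction n with
  | zero => intro xs; simp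
  | succ n ih =>
    intro xs
    match xs with
    | [] => simp [pvWF]
    | c :: rest => simpa [pvWF] using ih rest

-- A's inner for-loop as a fold over the payload slice
theorem pv_inner_eq (cs : List Char) (m : Nat) : ∀ (i0 : Nat) (other mult : Int),
    i0 + 1 + m ≤ cs.length →
    (PySem.List.pyRange 0 (m : Int) 1).foldl
      (fun (st : Int × Int × Int) _ =>
        (st.1 + 1, st.2.1 + st.2.2 * (((PySem.List.pyGetD cs (st.1 + 1) ' ').toNat : Int) - 64),
          st.2.2 * 64))
      ((i0 : Int), other, mult)
    = (((i0 + m : Nat) : Int),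
        ((cs.drop (i0 + 1)).take m).foldl
          (fun (st : Int × Int) ch => (st.1 + st.2 * ((ch.toNat : Int) - 64), st.2 * 64)) (other, mult)) := by
  induction m with
  | zero =>
    intro i0 other mult _
    simp [PySem.List.pyRange_one_eq_nil]
  | succ m ih =>
    intro i0 other mult h
    have hm : ((m : Int) + 1) = ((m + 1 : Nat) : Int) := by push_cast; ring
    have hsplit : PySem.List.pyRange 0 ((m + 1 : Nat) : Int) 1
        = PySem.List.pyRange 0 (m : Int) 1 ++ [(m : Int)] := by
      rw [← hm]; exact PySem.List.pyRange_one_succ_right (by positivity)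
    rw [hsplit, List.foldl_append, ih i0 other mult (by omega)]
    have hidx : i0 + 1 + m < cs.length := by omega
    have htake : (cs.drop (i0 + 1)).take (m + 1)
        = (cs.drop (i0 + 1)).take m ++ [cs[i0 + 1 + m]] := by
      rw [List.take_add_one]
      congr 1
      rw [List.getElem?_drop]
      simp [List.getElem?_eq_getElem hidx]
    rw [htake, List.foldl_append]
    simp only [List.foldl_cons, List.foldl_nil]
    have hget : PySem.List.pyGetD cs (((i0 + m : Nat) : Int) + 1) ' ' = cs[i0 + 1 + m] := by
      have : (((i0 + m : Nat) : Int) + 1) = ((i0 + 1 + m : Nat) : Int) := by push_cast; ring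
      rw [this, PySem.List.pyGetD_natCast]
      exact List.getD_eq_getElem cs ' ' hidx
    simp only [hget]
    refine Prod.ext ?_ rfl
    push_cast; ring

-- A's multiplier-threading fold versus B's right-to-left Horner evaluation
theorem pv_foldr_eq (l : List Char) : ∀ (other mult : Int),
    (l.foldl (fun (st : Int × Int) ch => (st.1 + st.2 * ((ch.toNat : Int) - 64), st.2 * 64)) (other, mult)).1
    = other + mult * (l.foldr (fun ch m => 64 * m + ((ch.toNat : Int) - 64)) 0) := by
  induction l with
  | nil => intro other mult; simp
  | cons c t ih =>
    intro other mult
    rw [List.foldl_cons, ih, List.foldr_cons]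
    ring

theorem pv_fold_eq (l : List Char) (other mult : Int) :
    (l.foldl (fun (st : Int × Int) ch => (st.1 + st.2 * ((ch.toNat : Int) - 64), st.2 * 64)) (other, mult)).1
    = other + mult * (l.reverse.foldl (fun m ch => 64 * m + ((ch.toNat : Int) - 64)) 0) := by
  rw [List.foldl_reverse]
  exact pv_foldr_eq l other mult

-- A's sign branch versus B's branch-free mod/floordiv formula
theorem pv_value_eq (code mag : Int) :
    (if code - 64 - 8 * PySem.Int.floordiv (code - 72 + 8) 8 < 4 then
      code - 64 - 8 * PySem.Int.floordiv (code - 72 + 8) 8 + 4 * mag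
    else 4 - (code - 64 - 8 * PySem.Int.floordiv (code - 72 + 8) 8) + 4 * mag)
    = 4 * mag + PySem.Int.mod (PySem.Int.mod (code - 64) 8) 4 *
        (1 - PySem.Int.floordiv (PySem.Int.mod (code - 64) 8) 4 * 2) := by
  have e0 : code - 72 + 8 = code - 64 := by ring
  rw [e0]
  rw [PySem.Int.floordiv_eq_ediv_of_pos (a := code - 64) (by norm_num),
    PySem.Int.mod_eq_emod_of_pos (a := code - 64) (by norm_num)]
  rw [PySem.Int.floordiv_eq_ediv_of_pos (by norm_num), PySem.Int.mod_eq_emod_of_pos (by norm_num)]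
  have h0 : 0 ≤ (code - 64) % 8 := Int.emod_nonneg _ (by norm_num)
  have h8 : (code - 64) % 8 < 8 := Int.emod_lt_of_pos _ (by norm_num)
  have hd : code - 64 - 8 * ((code - 64) / 8) = (code - 64) % 8 := by omega
  rw [hd]
  set m := (code - 64) % 8 with hm
  clear_value m
  interval_cases m <;> norm_num <;> ring

-- the main loop correspondence: with the same fuel and index, A's loop produces exactly
-- acc ++ the decodings of the spans B's first pass cuts from position i on
theorem pv_loop_eq (cs : List Char) : ∀ (fuel : Nat) (i : Nat) (acc : List String),
    pvWF (cs.drop i) 0 = true →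
    vl64A_loop cs fuel (i : Int) acc
      = acc ++ (pvBSpans cs fuel (i : Int)).map (pvBDecode cs) := by
  intro fuel
  induction fuel with
  | zero => intro i acc _; simp [vl64A_loop, pvBSpans]
  | succ fuel ih =>
    intro i acc hwf
    by_cases hi : i < cs.length
    · have hdrop : cs.drop i = cs[i] :: cs.drop (i + 1) := List.drop_eq_getElem_cons hi
      set c := cs[i] with hc
      set rest := cs.drop (i + 1) with hrest
      have hrl : rest.length = cs.length - (i + 1) := by simp [hrest]
      set finish := PySem.Int.floordiv ((c.toNat : Int) - 64) 8 with hfin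
      have hget0 : PySem.List.pyGetD cs (i : Int) ' ' = c := by
        rw [PySem.List.pyGetD_natCast]; exact List.getD_eq_getElem cs ' ' hi
      have hAfin2 : PySem.Int.floordiv (((c.toNat : Int)) - 72 + 8) 8 = finish := by
        rw [hfin]; congr 1; omega
      rw [hdrop] at hwf
      simp only [pvWF] at hwf
      by_cases hf : 1 ≤ finish
      · -- multi-byte value: finish ≥ 1, k = finish - 1 continuation bytes
        set k := (finish - 1).toNat with hk
        have hkf : (k : Int) = finish - 1 := by omega
        rw [if_pos hf] at hwf
        obtain ⟨hkle, hwf'⟩ := (pvWF_drop k rest).mp hwf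
        have hlen : i + 1 + k ≤ cs.length := by omega
        have hinner := pv_inner_eq cs k i 0 4 hlen
        rw [vl64A_loop, if_pos (by exact_mod_cast hi)]
        simp only [hget0, hAfin2]
        have hf1 : finish - 1 = (k : Int) := by omega
        simp only [hf1, hinner, ← hrest]
        have hslice : PySem.List.slice cs (some (((i + k : Nat) : Int) - finish + 1))
            (some (((i + k : Nat) : Int) + 1)) = c :: rest.take k := by
          have e1 : ((i + k : Nat) : Int) - finish + 1 = ((i : Nat) : Int) := by omega
          have e2 : ((i + k : Nat) : Int) + 1 = ((i + k + 1 : Nat) : Int) := by push_cast; ring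
          rw [e1, e2, PySem.List.slice_natCast]
          have e3 : i + k + 1 - i = k + 1 := by omega
          rw [e3, hdrop, List.take_succ_cons]
        rw [hslice]
        -- unfold B's first pass one step
        have hspan : pvBSpans cs (fuel + 1) (i : Int)
            = ((i : Int), (i : Int) + finish) :: pvBSpans cs fuel ((i : Int) + finish) := by
          rw [pvBSpans]
          rw [if_pos (by exact_mod_cast hi)]
          simp only [hget0, ← hfin]
          rw [max_eq_left (by omega), max_eq_left (by omega)]
        rw [hspan]
        -- B's decode of this span equals A's appended string
        have hpay : PySem.List.slice cs (some ((i : Int) + 1)) (some ((i : Int) + finish))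
            = rest.take k := by
          rw [show ((i : Int) + 1) = ((i + 1 : Nat) : Int) by push_cast; ring,
            show ((i : Int) + finish) = ((i + 1 + k : Nat) : Int) by push_cast; omega,
            PySem.List.slice_natCast, ← hrest]
          congr 1; omega
        have hchunk : PySem.List.slice cs (some ((i : Int))) (some ((i : Int) + finish))
            = c :: rest.take k := by
          rw [show ((i : Int) + finish) = ((i + (k + 1) : Nat) : Int) by push_cast; omega,
            PySem.List.slice_natCast]
          rw [show i + (k + 1) - i = k + 1 by omega, hdrop, List.take_succ_cons]
        have hdec : pvBDecode cs ((i : Int), (i : Int) + finish)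
            = String.ofList ((c :: rest.take k) ++ (' ' :: '=' :: ' ' :: []) ++
                PySem.Int.toChars
                  (if (c.toNat : Int) - 64 - 8 * finish < 4 then
                    (c.toNat : Int) - 64 - 8 * finish + ((rest.take k).foldl
                      (fun (st : Int × Int) ch => (st.1 + st.2 * ((ch.toNat : Int) - 64), st.2 * 64)) (0, 4)).1
                  else 4 - ((c.toNat : Int) - 64 - 8 * finish) + ((rest.take k).foldl
                      (fun (st : Int × Int) ch => (st.1 + st.2 * ((ch.toNat : Int) - 64), st.2 * 64)) (0, 4)).1)) := by
          simp only [pvBDecode, hpay, hchunk, hget0]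
          congr 2
          rw [pv_fold_eq]
          have := pv_value_eq ((c.toNat : Int)) ((rest.take k).reverse.foldl
            (fun m ch => 64 * m + ((ch.toNat : Int) - 64)) 0)
          rw [hAfin2] at this
          simp only [zero_add]
          exact congrArg PySem.Int.toChars this.symm
        rw [show ((i + k : Nat) : Int) + 1 = ((i + k + 1 : Nat) : Int) by push_cast; ring]
        have hdd : rest.drop k = cs.drop (i + k + 1) := by
          rw [hrest, List.drop_drop]; congr 1; omega
        rw [ih (i + k + 1) _ (by rwa [hdd] at hwf')]
        rw [show ((i : Int) + finish) = ((i + k + 1 : Nat) : Int) by push_cast; omega] at hdec ⊢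
        simp only [List.map_cons, hdec]
        simp
      · -- finish ≤ 0: a single byte, empty chunk and empty payload
        rw [if_neg hf] at hwf
        rw [vl64A_loop, if_pos (by exact_mod_cast hi)]
        simp only [hget0, hAfin2]
        have hnil : PySem.List.pyRange 0 (finish - 1) 1 = ([] : List Int) :=
          PySem.List.pyRange_one_eq_nil (by omega)
        simp only [hnil, List.foldl_nil]
        have hsliceA : PySem.List.slice cs (some ((i : Int) - finish + 1)) (some ((i : Int) + 1))
            = ([] : List Char) := by
          rw [show ((i : Int) - finish + 1) = ((i + (1 - finish).toNat : Nat) : Int) by omega,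
            show ((i : Int) + 1) = ((i + 1 : Nat) : Int) by push_cast; ring,
            PySem.List.slice_natCast]
          rw [show i + 1 - (i + (1 - finish).toNat) = 0 by omega, List.take_zero]
        rw [hsliceA]
        have hspan : pvBSpans cs (fuel + 1) (i : Int)
            = ((i : Int), (i : Int)) :: pvBSpans cs fuel ((i : Int) + 1) := by
          rw [pvBSpans]
          rw [if_pos (by exact_mod_cast hi)]
          simp only [hget0, ← hfin]
          rw [max_eq_right (by omega), max_eq_right (by omega)]
          simp
        rw [hspan]
        have hpay : PySem.List.slice cs (some ((i : Int) + 1)) (some ((i : Int)))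
            = ([] : List Char) := by
          rw [show ((i : Int) + 1) = ((i + 1 : Nat) : Int) by push_cast; ring,
            PySem.List.slice_natCast]
          rw [show i - (i + 1) = 0 by omega, List.take_zero]
        have hchunk : PySem.List.slice cs (some ((i : Int))) (some ((i : Int)))
            = ([] : List Char) := by
          rw [PySem.List.slice_natCast]
          simp
        have hdec : pvBDecode cs ((i : Int), (i : Int))
            = String.ofList (([] : List Char) ++ (' ' :: '=' :: ' ' :: []) ++
                PySem.Int.toChars
                  (if (c.toNat : Int) - 64 - 8 * finish < 4 then
                    (c.toNat : Int) - 64 - 8 * finish + 0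
                  else 4 - ((c.toNat : Int) - 64 - 8 * finish) + 0)) := by
          simp only [pvBDecode, hpay, hchunk, hget0]
          congr 2
          simp only [List.reverse_nil, List.foldl_nil]
          have := pv_value_eq ((c.toNat : Int)) 0
          rw [hAfin2] at this
          simp only [mul_zero, add_zero, zero_add] at this ⊢
          exact congrArg PySem.Int.toChars this.symm
        rw [show ((i : Int) + 1) = ((i + 1 : Nat) : Int) by push_cast; ring]
        rw [ih (i + 1) _ (by rwa [← hrest])]
        simp only [List.map_cons, hdec]
        simp
    · have hi' : cs.length ≤ i := by omega
      rw [vl64A_loop, pvBSpans]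
      rw [if_neg (by exact_mod_cast Nat.not_lt.mpr hi'), if_neg (by exact_mod_cast Nat.not_lt.mpr hi')]
      simp

-- ===== VERDICT (by name: the statement is the Claim_ definition above) =====
theorem vl64_decode_verbose_spec : Claim_equal_vl64_decode_verbose := by
  intro s _ hpre
  unfold Spec_vl64_decode_verbose vl64_decode_verbose vl64_decode_verbose_alt
  have := pv_loop_eq s.toList s.toList.length 0 [] (by simpa using hpre)
  simpa using this
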